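-- pv_equiv track=rewrite | github.com/caleberi/leetcody | shoppingSpree.py | shoppingSpree
-- ===== SOURCE A (Python) =====
-- def shoppingSpree(prices):
--     if len(prices) == 0 or len(prices) == 1:
--         return prices
--     else:
--         ret = [0 for _ in range(len(prices))]
--         for i in range(len(prices)):
--             j = len(prices)-1
--             while j > i:
--                 dicount = prices[i] - prices[j]
--                 if dicount >= ret[i]:
--                     ret[i] = dicount
--                 j -= 1
--         ret[len(prices) - 1] = prices[len(prices) - 1]
--         return ret
-- ===== SOURCE B (Python) =====
-- def shoppingSpree(prices):
--     n = len(prices)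
--     if n <= 1:
--         return prices
--     ret = [0] * n
--     ret[n - 1] = prices[n - 1]
--     suf = prices[n - 1]
--     for i in range(n - 2, -1, -1):
--         ret[i] = max(0, prices[i] - suf)
--         if prices[i] < suf:
--             suf = prices[i]
--     return ret
-- ===== Notes on version B (the rewrite author's own statement) =====
-- stated objective: faster
-- what changed: Replaced the O(n^2) nested scan (for each i, a backward inner scan over all j>i taking the max discount) with a single backward pass that maintains the running suffix minimum, so ret[i] = max(0, prices[i] - suffix_min).
import Mathlib
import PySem

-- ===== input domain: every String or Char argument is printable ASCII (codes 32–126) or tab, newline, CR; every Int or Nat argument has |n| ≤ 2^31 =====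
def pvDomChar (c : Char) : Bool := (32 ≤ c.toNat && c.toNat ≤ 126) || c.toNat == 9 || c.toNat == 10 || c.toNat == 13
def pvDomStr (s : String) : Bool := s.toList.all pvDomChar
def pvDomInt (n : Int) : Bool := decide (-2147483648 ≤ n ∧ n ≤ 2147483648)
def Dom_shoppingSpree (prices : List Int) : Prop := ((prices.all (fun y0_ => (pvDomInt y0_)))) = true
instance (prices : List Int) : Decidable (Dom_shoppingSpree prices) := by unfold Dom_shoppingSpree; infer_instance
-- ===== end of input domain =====

-- B replaces A's O(n^2) nested scans by one backward pass tracking the suffix minimum (objective: faster).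

-- ===== PORT A =====
-- inner `while j > i` loop of A; acc threads ret[i] (all list indices here are in range, so getD is exact)
def innerA (prices : List Int) (i : Nat) (j : Nat) (acc : Int) : Int :=
  if _h : j > i then
    let d := prices.getD i 0 - prices.getD j 0
    innerA prices i (j - 1) (if d ≥ acc then d else acc)
  else acc
termination_by j
decreasing_by omega

def shoppingSpree (prices : List Int) : List Int :=
  if prices.length = 0 ∨ prices.length = 1 then prices
  else
    let n := prices.length
    let ret0 := (List.range n).map (fun _ => (0 : Int))
    let ret := (List.range n).foldl
      (fun r i => r.set i (innerA prices i (n - 1) (r.getD i 0))) ret0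
    ret.set (n - 1) (prices.getD (n - 1) 0)

-- ===== PORT B =====
-- B's backward loop over i = n-2 .. 0 with the running suffix minimum `suf`,
-- as the structural recursion from the right; returns (result list, suffix minimum)
def goB : List Int → List Int × Int
  | [] => ([], 0)
  | [x] => ([x], x)
  | x :: y :: rest =>
    let (r, m) := goB (y :: rest)
    (max 0 (x - m) :: r, if x < m then x else m)

def shoppingSpree_alt (prices : List Int) : List Int :=
  if prices.length ≤ 1 then prices
  else (goB prices).1

-- ===== PRECONDITION & SPEC =====
def Spec_shoppingSpree (prices : List Int) (out : List Int) : Prop := out = shoppingSpree_alt prices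
instance (prices : List Int) (out : List Int) : Decidable (Spec_shoppingSpree prices out) := by unfold Spec_shoppingSpree; infer_instance

-- ===== CLAIM (what is proved, stated in full; the proofs are below) =====
def Claim_equal_shoppingSpree : Prop := ∀ (prices : List Int), Dom_shoppingSpree prices → Spec_shoppingSpree prices (shoppingSpree prices)

-- ===== LEMMAS AND PROOFS =====

-- minimum of prices over indices i+1 .. j (proof-side helper)
def minTo (p : List Int) (i j : Nat) : Int :=
  if j ≤ i + 1 then p.getD j 0
  else min (minTo p i (j - 1)) (p.getD j 0)
termination_by j
decreasing_by omega

lemma innerA_stop (p : List Int) (i j : Nat) (acc : Int) (h : ¬ j > i) :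
    innerA p i j acc = acc := by
  rw [innerA]; simp [h]

lemma innerA_eq (p : List Int) (i : Nat) :
    ∀ j acc, i < j → innerA p i j acc = max acc (p.getD i 0 - minTo p i j) := by
  intro j
  induction j using Nat.strong_induction_on with
  | _ j ih =>
    intro acc hij
    rw [innerA]
    simp only [hij, dite_true]
    by_cases hj : j ≤ i + 1
    · have hj' : j = i + 1 := by omega
      subst hj'
      rw [innerA_stop p i (i + 1 - 1) _ (by omega)]
      rw [minTo]; simp only [le_refl, if_true]
      split_ifs <;> omega
    · have h1 : i < j - 1 := by omega
      rw [ih (j - 1) (by omega) _ h1]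
      conv_rhs => rw [minTo]
      simp only [hj, if_false]
      omega

lemma goB_fst_length : ∀ (l : List Int), (goB l).1.length = l.length := by
  intro l
  induction l with
  | nil => rfl
  | cons x t ih =>
    cases t with
    | nil => rfl
    | cons y rest =>
      have h := ih
      simp only [goB, List.length_cons] at h ⊢
      omega

lemma goB_snd_append (a : Int) :
    ∀ (l : List Int), l ≠ [] → (goB (l ++ [a])).2 = min (goB l).2 a := by
  intro l
  induction l with
  | nil => intro h; exact absurd rfl h
  | cons x t ih =>
    intro _
    cases t with
    | nil =>
      simp [goB, min_def]; split_ifs <;> omega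
    | cons y rest =>
      have ih' := ih (by simp)
      simp only [List.cons_append, goB] at *
      rw [ih']
      rcases le_total (goB (y :: rest)).2 a with h | h <;>
        simp [min_def, *] <;> split_ifs <;> omega

lemma goB_fst_get :
    ∀ (l : List Int), l ≠ [] → ∀ i, i < l.length →
      (goB l).1.getD i 0 =
        if i = l.length - 1 then l.getD i 0
        else max 0 (l.getD i 0 - (goB (l.drop (i + 1))).2) := by
  intro l
  induction l with
  | nil => intro h; exact absurd rfl h
  | cons x t ih =>
    intro _ i hi
    cases t with
    | nil =>
      have hi0 : i = 0 := by simp at hi; omega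
      subst hi0; simp [goB]
    | cons y rest =>
      cases i with
      | zero => simp [goB]
      | succ i' =>
        have ih' := ih (by simp) i' (by simpa using hi)
        simp only [goB]
        simp only [List.length_cons] at *
        simpa [Nat.succ_sub_one] using ih'

lemma minTo_eq_goB (p : List Int) (i : Nat) :
    ∀ j, i < j → j < p.length →
      minTo p i j = (goB ((p.drop (i + 1)).take (j - i))).2 := by
  intro j
  induction j using Nat.strong_induction_on with
  | _ j ih =>
    intro hij hj
    by_cases hb : j ≤ i + 1
    · have hj' : j = i + 1 := by omega
      subst hj'
      rw [minTo]; simp only [le_refl, if_true]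
      have hlt : i + 1 < p.length := hj
      have hdrop : p.drop (i + 1) = p[i + 1] :: p.drop (i + 2) :=
        (List.getElem_cons_drop hlt).symm
      have h1 : i + 1 - i = 1 := by omega
      rw [h1, hdrop, List.take_succ_cons, List.take_zero, List.getD_eq_getElem _ _ hlt]
      rfl
    · rw [minTo]; simp only [hb, if_false]
      have h1 : i < j - 1 := by omega
      rw [ih (j - 1) (by omega) h1 (by omega)]
      have hk : j - i = (j - 1 - i) + 1 := by omega
      have hidx : (p.drop (i + 1))[j - 1 - i]? = some p[j] := by
        rw [List.getElem?_drop]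
        have : i + 1 + (j - 1 - i) = j := by omega
        rw [this, List.getElem?_eq_getElem hj]
      have htake : (p.drop (i + 1)).take (j - i)
          = (p.drop (i + 1)).take (j - 1 - i) ++ [p[j]] := by
        rw [hk, List.take_add_one, hidx]; rfl
      have hne : (p.drop (i + 1)).take (j - 1 - i) ≠ [] := by
        have hlen : ((p.drop (i + 1)).take (j - 1 - i)).length = min (j - 1 - i) (p.length - (i + 1)) := by
          simp
        intro hnil
        rw [hnil] at hlen
        simp at hlen
        omega
      rw [htake, goB_snd_append _ _ hne]
      have : p.getD j 0 = p[j] := List.getD_eq_getElem p 0 hj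
      rw [this]

-- the outer for-loop of A, characterised
lemma foldA (p : List Int) (n : Nat) :
    ∀ k, k ≤ n →
      (List.range k).foldl
        (fun r i => r.set i (innerA p i (n - 1) (r.getD i 0)))
        ((List.range n).map (fun _ => (0 : Int)))
      = (List.range n).map (fun i => if i < k then innerA p i (n - 1) 0 else 0) := by
  intro k
  induction k with
  | zero => intro _; simp
  | succ k ih =>
    intro hk
    rw [List.range_succ, List.foldl_append, ih (by omega)]
    simp only [List.foldl_cons, List.foldl_nil]
    have hget : ((List.range n).map (fun i => if i < k then innerA p i (n - 1) 0 else 0)).getD k 0 = 0 := by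
      rw [List.getD_eq_getElem _ _ (by simpa using hk)]
      simp
    rw [hget]
    apply List.ext_getElem
    · simp
    · intro m h1 h2
      simp only [List.getElem_set, List.getElem_map, List.getElem_range]
      by_cases hmk : k = m
      · subst hmk; simp
      · rw [if_neg hmk]; split_ifs <;> first | rfl | omega

theorem shoppingSpree_eq_alt (prices : List Int) :
    shoppingSpree prices = shoppingSpree_alt prices := by
  by_cases hs : prices.length ≤ 1
  · unfold shoppingSpree shoppingSpree_alt
    have h01 : prices.length = 0 ∨ prices.length = 1 := by omega
    rw [if_pos h01, if_pos hs]
  · have hn : 2 ≤ prices.length := by omega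
    have hne : prices ≠ [] := by intro h; rw [h] at hn; simp at hn
    unfold shoppingSpree shoppingSpree_alt
    have hcond : ¬ (prices.length = 0 ∨ prices.length = 1) := by omega
    simp only [hcond, if_false, hs]
    rw [foldA prices prices.length prices.length (le_refl _)]
    apply List.ext_getElem
    · simp [goB_fst_length]
    · intro i h1 h2
      have hi : i < prices.length := by simpa using h1
      have hrhs := goB_fst_get prices hne i hi
      rw [List.getD_eq_getElem _ _ (by rw [goB_fst_length]; exact hi)] at hrhs
      rw [hrhs]
      simp only [List.getElem_set, List.getElem_map, List.getElem_range]
      by_cases hlast : i = prices.length - 1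
      · simp [hlast]
      · have hilt : i < prices.length - 1 := by omega
        simp only [hlast, if_false, hi, if_true]
        have h3 : ¬ i = prices.length - 1 := hlast
        rw [if_neg (by omega)]
        rw [innerA_eq prices i (prices.length - 1) 0 hilt]
        rw [minTo_eq_goB prices i (prices.length - 1) hilt (by omega)]
        have htake : (prices.drop (i + 1)).take (prices.length - 1 - i) = prices.drop (i + 1) := by
          apply List.take_of_length_le
          simp only [List.length_drop]
          omega
        rw [htake, List.getD_eq_getElem _ _ hi]

-- ===== VERDICT (by name: the statement is the Claim_ definition above) =====
theorem shoppingSpree_spec : Claim_equal_shoppingSpree := by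
  intro prices _
  unfold Spec_shoppingSpree
  exact shoppingSpree_eq_alt prices
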